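-- pv_equiv track=rewrite | github.com/deconvolution-w/DASV | new-create-pic.py | get_array_nonzero_area
-- ===== SOURCE A (Python) =====
-- def get_array_nonzero_area(array):
--     temp = []
--     output_temp = []
--     for i in range(len(array)):
--         if array[i] != 0:
--             temp.append(i)
--     output_temp.append(temp[0])
--     output_temp.append(temp[-1])
--     return output_temp
-- ===== SOURCE B (Python) =====
-- def get_array_nonzero_area(array):
--     first = None
--     for i in range(len(array)):
--         if array[i] != 0:
--             first = i
--             break
--     if first is None:
--         raise IndexError("list index out of range")
--     last = len(array) - 1
--     while array[last] == 0:
--         last -= 1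
--     return [first, last]
-- ===== Notes on version B (the rewrite author's own statement) =====
-- stated objective: faster
-- what changed: Instead of building the full list of all nonzero indices and taking its ends, B scans forward to the first nonzero and backward to the last, stopping early; equivalence is claimed on arrays with at least one nonzero element (A raises IndexError otherwise, and so does B).
-- outside the precondition, e.g. on get_array_nonzero_area([0, 0]): A raises IndexError, B raises IndexError
import Mathlib
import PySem

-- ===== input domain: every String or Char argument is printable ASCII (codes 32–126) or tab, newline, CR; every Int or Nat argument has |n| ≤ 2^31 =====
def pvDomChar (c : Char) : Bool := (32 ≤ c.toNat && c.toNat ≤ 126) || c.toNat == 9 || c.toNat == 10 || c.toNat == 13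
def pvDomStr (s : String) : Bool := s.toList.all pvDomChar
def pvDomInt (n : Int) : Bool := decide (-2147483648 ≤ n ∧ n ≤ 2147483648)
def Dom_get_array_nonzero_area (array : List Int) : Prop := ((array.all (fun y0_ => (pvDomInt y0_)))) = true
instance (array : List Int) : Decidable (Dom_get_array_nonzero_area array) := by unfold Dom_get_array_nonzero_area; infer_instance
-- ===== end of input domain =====

-- B replaces A's full pass that collects every nonzero index with two early-exit scans
-- (forward for the first nonzero, backward for the last); equivalence on arrays with a
-- nonzero element (A raises IndexError otherwise, and so does the Python B).

-- ===== PORT A =====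
-- the loop 'for i in range(len(array)): if array[i] != 0: temp.append(i)', then [temp[0], temp[-1]]
def get_array_nonzero_area (array : List Int) : List Int :=
  let temp := (PySem.List.pyRange 0 (array.length : Int) 1).foldl
    (fun t i => if PySem.List.pyGetD array i 0 ≠ 0 then t ++ [i] else t) ([] : List Int)
  [PySem.List.pyGetD temp 0 0, PySem.List.pyGetD temp (-1) 0]

-- ===== PORT B =====
-- forward scan with break: 'for i in range(len(array)): if array[i] != 0: first = i; break'
def bFindFirst : List Int → Int → Option Int
  | [], _ => none
  | x :: t, k => if x ≠ 0 then some k else bFindFirst t (k + 1)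

-- the index-decrementing loop 'while array[last] == 0: last -= 1' walks the list from the
-- end, so it is transcribed as a recursion over the reversed list carrying the current
-- index; the [] case (all elements zero) is never reached under Pre_.
def bFindLast : List Int → Int → Int
  | [], i => i
  | y :: t, i => if y = 0 then bFindLast t (i - 1) else i

def get_array_nonzero_area_alt (array : List Int) : List Int :=
  match bFindFirst array 0 with
  | none => []   -- the Python B raises IndexError here (excluded by Pre_)
  | some f => [f, bFindLast array.reverse ((array.length : Int) - 1)]

-- ===== PRECONDITION & SPEC =====
-- A raises IndexError (temp[0] on an empty temp) exactly when the array has no nonzero element.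
def Pre_get_array_nonzero_area (array : List Int) : Prop := ∃ x ∈ array, x ≠ 0
instance (array : List Int) : Decidable (Pre_get_array_nonzero_area array) := by
  unfold Pre_get_array_nonzero_area; infer_instance

def pvWitness_get_array_nonzero_area : List Int := [0, 3, 0]

def Spec_get_array_nonzero_area (array : List Int) (out : List Int) : Prop :=
  out = get_array_nonzero_area_alt array
instance (array : List Int) (out : List Int) : Decidable (Spec_get_array_nonzero_area array out) := by
  unfold Spec_get_array_nonzero_area; infer_instance

-- ===== CLAIM (what is proved, stated in full; the proofs are below) =====
def Claim_equal_get_array_nonzero_area : Prop := ∀ (array : List Int), Dom_get_array_nonzero_area array → Pre_get_array_nonzero_area array → Spec_get_array_nonzero_area array (get_array_nonzero_area array)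

-- ===== LEMMAS AND PROOFS =====

def fnz : List Int → Option Nat
  | [] => none
  | x :: t => if x ≠ 0 then some 0 else (fnz t).map (· + 1)

theorem fnz_some (xs : List Int) (h : ∃ x ∈ xs, x ≠ 0) : ∃ j, fnz xs = some j := by
  induction xs with
  | nil => simp at h
  | cons x t ih =>
    by_cases hx : x = 0
    · obtain ⟨y, hy, hy0⟩ := h
      rw [List.mem_cons] at hy
      rcases hy with rfl | hy
      · exact absurd hx hy0
      · obtain ⟨j, hj⟩ := ih ⟨y, hy, hy0⟩
        exact ⟨j + 1, by simp [fnz, hx, hj]⟩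
    · exact ⟨0, by simp [fnz, hx]⟩

theorem fnz_lt (xs : List Int) (j : Nat) (h : fnz xs = some j) : j < xs.length := by
  induction xs generalizing j with
  | nil => simp [fnz] at h
  | cons x t ih =>
    by_cases hx : x = 0
    · simp only [fnz, hx] at h
      simp at h
      obtain ⟨j', hj', rfl⟩ := h
      simpa using Nat.succ_lt_succ (ih j' hj')
    · simp [fnz, hx] at h
      simp [← h]

theorem bFindFirst_eq (xs : List Int) (k : Int) :
    bFindFirst xs k = (fnz xs).map (fun j => k + (j : Int)) := by
  induction xs generalizing k with
  | nil => simp [bFindFirst, fnz]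
  | cons x t ih =>
    by_cases hx : x = 0
    · simp [bFindFirst, fnz, hx, ih]
      cases fnz t <;> simp
      ring
    · simp [bFindFirst, fnz, hx]

theorem bFindLast_eq (ys : List Int) (i : Int) (j : Nat) (h : fnz ys = some j) :
    bFindLast ys i = i - (j : Int) := by
  induction ys generalizing i j with
  | nil => simp [fnz] at h
  | cons y t ih =>
    by_cases hy : y = 0
    · simp only [fnz, hy] at h
      simp at h
      obtain ⟨j', hj', rfl⟩ := h
      rw [bFindLast, if_pos hy, ih (i - 1) j' hj']
      push_cast
      ring
    · simp [fnz, hy] at h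
      rw [bFindLast, if_neg hy, ← h]
      simp

theorem head?_filter_range (xs : List Int) :
    (((List.range xs.length).filter (fun j => decide (xs.getD j 0 ≠ 0))).head?) = fnz xs := by
  induction xs with
  | nil => simp [fnz]
  | cons x t ih =>
    rw [List.length_cons, List.range_succ_eq_map]
    by_cases hx : x = 0
    · simp only [List.filter_cons]
      simp [hx, fnz, List.filter_map, Function.comp_def, ← ih]
      rfl
    · simp [hx, fnz]

theorem getLast?_filter_range (xs : List Int) :
    (((List.range xs.length).filter (fun j => decide (xs.getD j 0 ≠ 0))).getLast?) =
      (fnz xs.reverse).map (fun j => xs.length - 1 - j) := by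
  induction xs using List.reverseRecOn with
  | nil => simp [fnz]
  | append_singleton t x ih =>
    rw [List.length_append, List.length_cons, List.length_nil, Nat.zero_add, List.range_succ,
        List.filter_append]
    have hfc : (List.range t.length).filter (fun j => decide ((t ++ [x]).getD j 0 ≠ 0))
        = (List.range t.length).filter (fun j => decide (t.getD j 0 ≠ 0)) := by
      apply List.filter_congr
      intro j hj
      rw [List.mem_range] at hj
      have : (t ++ [x]).getD j 0 = t.getD j 0 := by
        simp [List.getD_eq_getElem?_getD, List.getElem?_append_left hj]
      rw [this]
    have hlast : (t ++ [x]).getD t.length 0 = x := by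
      simp [List.getD_eq_getElem?_getD]
    rw [hfc, List.reverse_append]
    by_cases hx : x = 0
    · subst hx
      simp only [List.filter_cons, List.filter_nil, hlast]
      simp only [ne_eq, not_true_eq_false, decide_false, Bool.false_eq_true, if_false,
        List.append_nil, List.reverse_cons, List.reverse_nil, List.nil_append]
      rw [ih]
      cases h : fnz t.reverse with
      | none => simp [fnz, h]
      | some j => simp [fnz, h]; omega
    · simp only [List.filter_cons, List.filter_nil, hlast]
      simp [fnz, hx]

-- ===== VERDICT (by name: the statement is the Claim_ definition above) =====
theorem get_array_nonzero_area_spec : Claim_equal_get_array_nonzero_area := by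
  intro array _ hpre
  unfold Spec_get_array_nonzero_area
  obtain ⟨x0, hx0, hx00⟩ := hpre
  have hpre : ∃ x ∈ array, x ≠ 0 := ⟨x0, hx0, hx00⟩
  obtain ⟨j, hj⟩ := fnz_some array hpre
  obtain ⟨j', hj'⟩ := fnz_some array.reverse (by
    obtain ⟨x, hx, hx0⟩ := hpre
    exact ⟨x, List.mem_reverse.mpr hx, hx0⟩)
  set L : List Nat := (List.range array.length).filter (fun j => decide (array.getD j 0 ≠ 0)) with hL
  have hhead : L.head? = some j := by rw [hL, head?_filter_range]; exact hj
  have hlastL : L.getLast? = some (array.length - 1 - j') := by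
    rw [hL, getLast?_filter_range, hj']; rfl
  have htemp : (PySem.List.pyRange 0 (array.length : Int) 1).foldl
      (fun t i => if PySem.List.pyGetD array i 0 ≠ 0 then t ++ [i] else t) ([] : List Int)
      = L.map (Nat.cast : Nat → Int) := by
    rw [PySem.List.foldl_append_ite_eq_filter, PySem.List.pyRange_zero_nat,
        List.filter_map, List.nil_append, hL]
    congr 1
    apply List.filter_congr
    intro a _
    simp [Function.comp]
  obtain ⟨Ltail, hLcons⟩ : ∃ tl, L = j :: tl := by
    cases hc : L with
    | nil => rw [hc] at hhead; simp at hhead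
    | cons a tl =>
      rw [hc] at hhead
      simp at hhead
      exact ⟨tl, by rw [hhead]⟩
  have hj'lt : j' < array.length := by
    have := fnz_lt array.reverse j' hj'
    simpa using this
  have hne : L.map (Nat.cast : Nat → Int) ≠ [] := by simp [hLcons]
  have hA : get_array_nonzero_area array
      = [(j : Int), ((array.length - 1 - j' : Nat) : Int)] := by
    show [PySem.List.pyGetD _ 0 0, PySem.List.pyGetD _ (-1) 0] = _
    rw [htemp]
    have hfst : PySem.List.pyGetD (L.map (Nat.cast : Nat → Int)) 0 0 = (j : Int) := by
      rw [PySem.List.pyGetD_zero, hLcons]; simp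
    have hlst : PySem.List.pyGetD (L.map (Nat.cast : Nat → Int)) (-1) 0
        = ((array.length - 1 - j' : Nat) : Int) := by
      rw [PySem.List.pyGetD_neg_one _ _ hne]
      have h1 : (L.map (Nat.cast : Nat → Int)).getLast? = some ((array.length - 1 - j' : Nat) : Int) := by
        rw [List.getLast?_map, hlastL]; simp
      have h2 := List.getLast?_eq_some_getLast hne
      rw [h2] at h1
      exact Option.some.inj h1
    rw [hfst, hlst]
  have hB : get_array_nonzero_area_alt array
      = [(j : Int), ((array.length : Int) - 1 - (j' : Int))] := by
    unfold get_array_nonzero_area_alt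
    rw [bFindFirst_eq, hj]
    simp [bFindLast_eq array.reverse ((array.length : Int) - 1) j' hj']
  rw [hA, hB]
  have : ((array.length - 1 - j' : Nat) : Int) = (array.length : Int) - 1 - (j' : Int) := by
    omega
  rw [this]
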